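-- pv_equiv track=rewrite | github.com/mfurnival-star/pcap2mermaid | pcap2mermaid.py | assign_participant_short_names
-- ===== SOURCE A (Python) =====
-- def assign_participant_short_names(participants):
--     sorted_participants = sorted(participants)
--     # Use A, B, C, ... AA, AB, ...
--     names = []
--     for i in range(len(sorted_participants)):
--         name = ''
--         x = i
--         while True:
--             name = chr(ord('A') + (x % 26)) + name
--             x = x // 26 - 1
--             if x < 0:
--                 break
--         names.append(name)
--     return {host: short for host, short in zip(sorted_participants, names)}
-- ===== SOURCE B (Python) =====
-- def _inc(label):
--     # label is a list of characters, least significant first; add one with carry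
--     if not label:
--         return ['A']
--     if label[0] == 'Z':
--         return ['A'] + _inc(label[1:])
--     return [chr(ord(label[0]) + 1)] + label[1:]
--
-- def assign_participant_short_names(participants):
--     result = {}
--     label = []
--     for host in sorted(participants):
--         label = _inc(label)
--         result[host] = ''.join(reversed(label))
--     return result
-- ===== Notes on version B (the rewrite author's own statement) =====
-- stated objective: alternative
-- what changed: Instead of converting each index independently to a bijective base-26 name with mod/floordiv arithmetic, B walks the sorted participants once while incrementing a running label (a reversed character list) with carry, building the dict as it goes.
import Mathlib
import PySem

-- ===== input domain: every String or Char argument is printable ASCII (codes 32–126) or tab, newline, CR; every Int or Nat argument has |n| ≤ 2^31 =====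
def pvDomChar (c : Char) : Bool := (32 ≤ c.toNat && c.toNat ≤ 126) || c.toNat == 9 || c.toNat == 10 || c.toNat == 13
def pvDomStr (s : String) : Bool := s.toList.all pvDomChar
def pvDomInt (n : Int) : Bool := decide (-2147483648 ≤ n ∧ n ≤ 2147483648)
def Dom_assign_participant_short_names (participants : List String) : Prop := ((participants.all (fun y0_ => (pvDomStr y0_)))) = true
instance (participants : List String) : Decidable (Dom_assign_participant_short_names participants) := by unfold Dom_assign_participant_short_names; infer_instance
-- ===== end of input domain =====

-- B replaces per-index bijective base-26 conversion by a single pass that increments a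
-- running label with carry while walking the sorted participants (objective: alternative).

-- ===== PORT A =====
-- the inner 'while True' loop of A: prepend chr(ord('A') + x % 26), x := x // 26 - 1, stop when x < 0
def pvNameLoop (x : Int) (name : List Char) : List Char :=
  let name' := Char.ofNat (65 + PySem.Int.mod x 26).toNat :: name
  let x' := PySem.Int.floordiv x 26 - 1
  if x' < 0 then name' else pvNameLoop x' name'
termination_by x.toNat
decreasing_by
  have h := PySem.Int.floordiv_eq_ediv_of_pos (a := x) (b := 26) (by norm_num)
  omega

def assign_participant_short_names (participants : List String) : List (String × String) :=
  let sorted_participants := PySem.List.sorted participants (fun s => s)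
  let names := (PySem.List.pyRange 0 (sorted_participants.length : Int)).foldl
      (fun ns i => ns ++ [String.mk (pvNameLoop i [])]) []
  ((sorted_participants.zip names).foldl (fun d p => d.insert p.1 p.2)
      (PySem.Dict.empty : PySem.Dict String String)).items

-- ===== PORT B =====
-- B's _inc: add one to the label (characters least significant first), 'Z' wraps to 'A' with carry
def pvIncRev : List Char → List Char
  | [] => ['A']
  | c :: rest => if c = 'Z' then 'A' :: pvIncRev rest else Char.ofNat (c.toNat + 1) :: rest

def assign_participant_short_names_alt (participants : List String) : List (String × String) :=
  ((PySem.List.sorted participants (fun s => s)).foldl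
      (fun (st : PySem.Dict String String × List Char) host =>
        let label := pvIncRev st.2
        (st.1.insert host (String.mk label.reverse), label))
      ((PySem.Dict.empty : PySem.Dict String String), ([] : List Char))).1.items

-- ===== PRECONDITION & SPEC =====
def Spec_assign_participant_short_names (participants : List String) (out : List (String × String)) : Prop := out = assign_participant_short_names_alt participants
instance (participants : List String) (out : List (String × String)) : Decidable (Spec_assign_participant_short_names participants out) := by unfold Spec_assign_participant_short_names; infer_instance

-- ===== CLAIM (what is proved, stated in full; the proofs are below) =====
def Claim_equal_assign_participant_short_names : Prop := ∀ (participants : List String), Dom_assign_participant_short_names participants → Spec_assign_participant_short_names participants (assign_participant_short_names participants)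

-- ===== LEMMAS AND PROOFS =====

-- controlled one-step unfolding of A's inner loop
theorem pvNameLoop_eq (x : Int) (name : List Char) : pvNameLoop x name =
    (if PySem.Int.floordiv x 26 - 1 < 0 then Char.ofNat (65 + PySem.Int.mod x 26).toNat :: name
     else pvNameLoop (PySem.Int.floordiv x 26 - 1)
            (Char.ofNat (65 + PySem.Int.mod x 26).toNat :: name)) := by
  rw [pvNameLoop]

-- the accumulator of A's inner loop is a pure suffix
theorem pvNameLoop_acc (n : Nat) : ∀ (x : Int), x.toNat = n →
    ∀ (name : List Char), pvNameLoop x name = pvNameLoop x [] ++ name := by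
  induction n using Nat.strong_induction_on with
  | _ n IH =>
    intro x hx name
    have h26 := PySem.Int.floordiv_eq_ediv_of_pos (a := x) (b := 26) (by norm_num)
    rw [pvNameLoop_eq x name, pvNameLoop_eq x []]
    by_cases hlt : PySem.Int.floordiv x 26 - 1 < 0
    · rw [if_pos hlt, if_pos hlt]; rfl
    · rw [if_neg hlt, if_neg hlt]
      have hdec : (PySem.Int.floordiv x 26 - 1).toNat < n := by omega
      rw [IH _ hdec _ rfl, IH _ hdec _ rfl (name := [Char.ofNat (65 + PySem.Int.mod x 26).toNat])]
      simp

-- peel one character off the reversed name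
theorem pvNameLoop_rev (x : Int) : (pvNameLoop x []).reverse =
    Char.ofNat (65 + PySem.Int.mod x 26).toNat ::
      (if PySem.Int.floordiv x 26 - 1 < 0 then []
       else (pvNameLoop (PySem.Int.floordiv x 26 - 1) []).reverse) := by
  rw [pvNameLoop_eq x []]
  by_cases hlt : PySem.Int.floordiv x 26 - 1 < 0
  · rw [if_pos hlt, if_pos hlt]; rfl
  · rw [if_neg hlt, if_neg hlt, pvNameLoop_acc _ _ rfl]
    simp

theorem pvNameLoop_zero_rev : (pvNameLoop 0 []).reverse = ['A'] := by
  rw [pvNameLoop_rev 0]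
  have h0 : PySem.Int.mod 0 26 = 0 := by
    rw [PySem.Int.mod_eq_emod_of_pos (by norm_num)]; decide
  have h1 : PySem.Int.floordiv 0 26 - 1 < 0 := by
    rw [PySem.Int.floordiv_eq_ediv_of_pos (by norm_num)]; decide
  rw [h0, if_pos h1]
  decide

-- the carry increment advances A's name by one index
theorem pvIncRev_nameLoop (n : Nat) : ∀ (x : Int), 0 ≤ x → x.toNat = n →
    pvIncRev ((pvNameLoop x []).reverse) = (pvNameLoop (x + 1) []).reverse := by
  induction n using Nat.strong_induction_on with
  | _ n IH =>
    intro x hx hn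
    have hm := PySem.Int.mod_eq_emod_of_pos (a := x) (b := 26) (by norm_num)
    have hm' := PySem.Int.mod_eq_emod_of_pos (a := x + 1) (b := 26) (by norm_num)
    have hd := PySem.Int.floordiv_eq_ediv_of_pos (a := x) (b := 26) (by norm_num)
    have hd' := PySem.Int.floordiv_eq_ediv_of_pos (a := x + 1) (b := 26) (by norm_num)
    have hmlt : x % 26 < 26 := Int.emod_lt_of_pos x (by norm_num)
    have hmge : 0 ≤ x % 26 := Int.emod_nonneg x (by norm_num)
    rw [pvNameLoop_rev x, pvNameLoop_rev (x + 1)]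
    by_cases hc : x % 26 = 25
    · -- carry case: the low character is 'Z'
      have hcz : Char.ofNat (65 + PySem.Int.mod x 26).toNat = 'Z' := by
        rw [hm, hc]; decide
      have h1 : Char.ofNat (65 + PySem.Int.mod (x + 1) 26).toNat = 'A' := by
        have h0 : (x + 1) % 26 = 0 := by omega
        rw [hm', h0]; decide
      have hdiv : PySem.Int.floordiv (x + 1) 26 - 1 = PySem.Int.floordiv x 26 := by
        rw [hd, hd']; omega
      rw [pvIncRev, if_pos hcz, h1, hdiv]
      have hge : ¬ (PySem.Int.floordiv x 26 < 0) := by rw [hd]; omega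
      rw [if_neg hge]
      by_cases hlo : PySem.Int.floordiv x 26 - 1 < 0
      · -- x < 26 here; the old tail is empty and the new tail is a single 'A'
        have hx0 : PySem.Int.floordiv x 26 = 0 := by rw [hd] at hlo ⊢; omega
        rw [if_pos hlo, hx0, pvNameLoop_zero_rev, pvIncRev]
      · rw [if_neg hlo]
        have h0 : 0 ≤ PySem.Int.floordiv x 26 - 1 := by omega
        have hlt : (PySem.Int.floordiv x 26 - 1).toNat < n := by rw [hd] at h0 ⊢; omega
        rw [IH _ hlt _ h0 rfl, sub_add_cancel]
    · -- no carry: bump the low character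
      have hv : ((65 : Int) + PySem.Int.mod x 26).toNat < 55296 := by rw [hm]; omega
      have htn : (Char.ofNat (65 + PySem.Int.mod x 26).toNat).toNat
          = (65 + PySem.Int.mod x 26).toNat := by
        rw [Char.toNat_ofNat, if_pos (Or.inl hv)]
      have hcnz : Char.ofNat (65 + PySem.Int.mod x 26).toNat ≠ 'Z' := by
        intro h
        have := congrArg Char.toNat h
        rw [htn, hm] at this
        have h90 : ('Z').toNat = 90 := rfl
        rw [h90] at this
        have : x % 26 = 25 := by omega
        exact hc this
      rw [pvIncRev, if_neg hcnz, htn]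
      have h1 : Char.ofNat ((65 + PySem.Int.mod x 26).toNat + 1)
          = Char.ofNat (65 + PySem.Int.mod (x + 1) 26).toNat := by
        have h0 : (x + 1) % 26 = x % 26 + 1 := by omega
        rw [hm, hm', h0]
        congr 1
        omega
      have hdiv : PySem.Int.floordiv (x + 1) 26 - 1 = PySem.Int.floordiv x 26 - 1 := by
        rw [hd, hd']
        have : (x + 1) / 26 = x / 26 := by omega
        omega
      rw [h1, hdiv]

-- A's names list is a map over List.range
theorem pvNames_eq (n : Nat) :
    (PySem.List.pyRange 0 (n : Int)).foldl (fun ns i => ns ++ [String.mk (pvNameLoop i [])]) []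
      = (List.range n).map (fun (k : Nat) => String.mk (pvNameLoop (k : Int) [])) := by
  rw [PySem.List.pyRange_zero_natCast, PySem.List.foldl_append_singleton_eq_map, List.map_map]
  simp [Function.comp_def]

theorem pvIncRev_base : pvIncRev [] = (pvNameLoop 0 []).reverse := by
  rw [pvNameLoop_zero_rev, pvIncRev]

-- B's single fold equals A's fold over the zipped names, for any start index k
theorem pvFold_eq : ∀ (l : List String) (d : PySem.Dict String String) (lab : List Char) (k : Nat),
    pvIncRev lab = (pvNameLoop (k : Int) []).reverse →
    (l.foldl (fun (st : PySem.Dict String String × List Char) host =>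
        let label := pvIncRev st.2
        (st.1.insert host (String.mk label.reverse), label)) (d, lab)).1
      = (l.zip ((List.range l.length).map
            (fun (j : Nat) => String.mk (pvNameLoop ((k : Int) + (j : Int)) [])))).foldl
          (fun d p => d.insert p.1 p.2) d := by
  intro l
  induction l with
  | nil => intro d lab k _; simp
  | cons h t IH =>
    intro d lab k hk
    have hshift : (List.range (h :: t).length).map
          (fun (j : Nat) => String.mk (pvNameLoop ((k : Int) + (j : Int)) []))
        = String.mk (pvNameLoop (k : Int) []) ::
          (List.range t.length).map
            (fun (j : Nat) => String.mk (pvNameLoop (((k + 1 : Nat) : Int) + (j : Int)) [])) := by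
      rw [List.length_cons, List.range_succ_eq_map, List.map_cons, List.map_map]
      refine congrArg₂ List.cons (by norm_num) (List.map_congr_left ?_)
      intro a _
      simp only [Function.comp_def, Nat.cast_succ]
      have harith : (k : Int) + ((a : Int) + 1) = ((k + 1 : Nat) : Int) + (a : Int) := by
        push_cast
        ring
      rw [harith]
      push_cast
      ring_nf
    rw [hshift, List.zip_cons_cons, List.foldl_cons, List.foldl_cons]
    have hnext : pvIncRev (pvIncRev lab) = (pvNameLoop (((k + 1 : Nat) : Int)) []).reverse := by
      rw [hk, pvIncRev_nameLoop (k : Int).toNat (k : Int) (by positivity) rfl]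
      norm_cast
    have hval : String.mk (pvIncRev lab).reverse = String.mk (pvNameLoop (k : Int) []) := by
      rw [hk, List.reverse_reverse]
    simp only []
    rw [hval]
    exact IH _ _ _ hnext

-- ===== VERDICT (by name: the statement is the Claim_ definition above) =====
theorem assign_participant_short_names_spec : Claim_equal_assign_participant_short_names := by
  intro participants _
  unfold Spec_assign_participant_short_names
  simp only [assign_participant_short_names, assign_participant_short_names_alt]
  rw [pvNames_eq, pvFold_eq (PySem.List.sorted participants (fun s => s))
        PySem.Dict.empty [] 0 (by rw [Nat.cast_zero]; exact pvIncRev_base)]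
  have hmap : (List.range (PySem.List.sorted participants (fun s => s)).length).map
        (fun (j : Nat) => String.mk (pvNameLoop ((((0 : Nat)) : Int) + (j : Int)) []))
      = (List.range (PySem.List.sorted participants (fun s => s)).length).map
        (fun (k : Nat) => String.mk (pvNameLoop (k : Int) [])) := by
    apply List.map_congr_left
    intro a _
    norm_num
  rw [hmap]
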